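-- pv_equiv track=rewrite | github.com/urmininad/vector_CD | vector_CD/aggregation_validity/funcs.py | vector_vars_from_Narray
-- ===== SOURCE A (Python) =====
-- def vector_vars_from_Narray(d_macro,d_micro):
--     N_array = [d_micro]*d_macro
--
--     N = len(N_array)
--     if N<2:
--         vector_vars = None
--     else:
--         vector_vars = {}
--         l=0
--         for i in range(N):
--             j = N_array[i]
--             for k in range(j):
--                 if k==0:
--                     vector_vars[i] = [(k+l,0)] #only defining contemporaneous vector_vars here !!!
--                 else:
--                     vector_vars[i].append((k+l,0)) #only defining contemporaneous vector_vars here !!!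
--             l+=j
--     return vector_vars
-- ===== SOURCE B (Python) =====
-- def vector_vars_from_Narray(d_macro, d_micro):
--     # Flat pass: generate all global indices at once, then partition into
--     # chunks of d_micro, one chunk per macro variable.
--     if d_macro < 2:
--         return None
--     if d_micro <= 0:
--         return {}
--     flat = [(n, 0) for n in range(d_macro * d_micro)]
--     return {i: flat[i * d_micro:(i + 1) * d_micro] for i in range(d_macro)}
-- ===== Notes on version B (the rewrite author's own statement) =====
-- stated objective: simpler
-- what changed: Replaces the nested loop with running offset, dict accumulator and first/append special case by one flat list of all global indices that is sliced into d_micro-sized chunks, one per macro variable.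
import Mathlib
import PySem

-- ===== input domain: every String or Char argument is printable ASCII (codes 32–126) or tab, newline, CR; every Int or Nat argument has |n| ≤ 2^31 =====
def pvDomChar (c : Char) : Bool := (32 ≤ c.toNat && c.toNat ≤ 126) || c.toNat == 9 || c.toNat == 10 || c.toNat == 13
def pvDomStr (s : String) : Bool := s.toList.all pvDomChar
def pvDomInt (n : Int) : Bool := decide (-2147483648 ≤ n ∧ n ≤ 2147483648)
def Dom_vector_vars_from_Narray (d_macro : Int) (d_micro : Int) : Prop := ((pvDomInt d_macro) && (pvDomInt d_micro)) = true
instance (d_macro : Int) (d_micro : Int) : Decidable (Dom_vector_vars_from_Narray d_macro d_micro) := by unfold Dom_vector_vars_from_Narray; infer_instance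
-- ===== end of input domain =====

-- B replaces A's nested loop / running-offset / first-vs-append dict building by one flat
-- index list sliced into d_micro-sized chunks (objective: simpler). Same return value everywhere.

-- ===== PORT A =====
-- literal transliteration of A: N_array = [d_micro]*d_macro; nested loop over range(N) and
-- range(N_array[i]) building the dict, with running offset l.
def vector_vars_from_Narray (d_macro : Int) (d_micro : Int) : Option (List (Int × List (Int × Int))) :=
  let N_array : List Int := List.replicate d_macro.toNat d_micro
  let N : Int := PySem.List.len N_array
  if N < 2 then none
  else
    let st :=
      (PySem.List.pyRange 0 N 1).foldl
        (fun (st : PySem.Dict Int (List (Int × Int)) × Int) i =>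
          let j := PySem.List.pyGetD N_array i 0
          let vv :=
            (PySem.List.pyRange 0 j 1).foldl
              (fun vv k =>
                if k == 0 then vv.insert i [(k + st.2, 0)]
                else vv.modify i [] (fun xs => xs ++ [(k + st.2, 0)]))
              st.1
          (vv, st.2 + j))
        (PySem.Dict.empty, 0)
    some st.1.items

-- ===== PORT B =====
-- literal transliteration of B: guard, flat list of all (n,0), then one slice per macro var.
def vector_vars_from_Narray_alt (d_macro : Int) (d_micro : Int) : Option (List (Int × List (Int × Int))) :=
  if d_macro < 2 then none
  else if d_micro ≤ 0 then some []
  else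
    let flat := (PySem.List.pyRange 0 (d_macro * d_micro) 1).map (fun n => (n, (0 : Int)))
    some ((PySem.List.pyRange 0 d_macro 1).map (fun i =>
      (i, PySem.List.slice flat (some (i * d_micro)) (some ((i + 1) * d_micro)))))

-- ===== PRECONDITION & SPEC =====
def Spec_vector_vars_from_Narray (d_macro : Int) (d_micro : Int) (out : Option (List (Int × List (Int × Int)))) : Prop := out = vector_vars_from_Narray_alt d_macro d_micro
instance (d_macro : Int) (d_micro : Int) (out : Option (List (Int × List (Int × Int)))) : Decidable (Spec_vector_vars_from_Narray d_macro d_micro out) := by unfold Spec_vector_vars_from_Narray; infer_instance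

-- ===== CLAIM (what is proved, stated in full; the proofs are below) =====
def Claim_equal_vector_vars_from_Narray : Prop := ∀ (d_macro : Int) (d_micro : Int), Dom_vector_vars_from_Narray d_macro d_micro → Spec_vector_vars_from_Narray d_macro d_micro (vector_vars_from_Narray d_macro d_micro)

-- ===== LEMMAS AND PROOFS =====

theorem modify_insert_self (d : PySem.Dict Int (List (Int × Int))) (i : Int)
    (v : List (Int × Int)) (f : List (Int × Int) → List (Int × Int)) :
    (d.insert i v).modify i [] f = d.insert i (f v) := by
  unfold PySem.Dict.modify
  rw [PySem.Dict.getD_insert_self, PySem.Dict.insert_insert_self]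

-- over nonzero k's, the inner body only appends to the value at key i
theorem inner_all (i l : Int) :
    ∀ (ks : List Int), (∀ k ∈ ks, k ≠ 0) →
    ∀ (d : PySem.Dict Int (List (Int × Int))) (v : List (Int × Int)),
    ks.foldl
      (fun vv k =>
        if k == 0 then vv.insert i [(k + l, 0)]
        else vv.modify i [] (fun xs => xs ++ [(k + l, 0)])) (d.insert i v)
      = d.insert i (v ++ ks.map (fun k => (k + l, 0))) := by
  intro ks
  induction ks with
  | nil => intro _ d v; simp
  | cons k ks ih =>
    intro hks d v
    have hk : (k == (0 : Int)) = false := by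
      simp only [beq_eq_false_iff_ne]; exact hks k (List.mem_cons_self)
    simp only [List.foldl_cons, List.map_cons, hk, Bool.false_eq_true, if_false]
    rw [modify_insert_self, ih (fun x hx => hks x (List.mem_cons_of_mem _ hx))]
    simp

-- the whole inner loop (j > 0) inserts the contemporaneous row for key i
theorem inner_loop (i l j : Int) (hj : 0 < j) (d : PySem.Dict Int (List (Int × Int))) :
    (PySem.List.pyRange 0 j 1).foldl
      (fun vv k =>
        if k == 0 then vv.insert i [(k + l, 0)]
        else vv.modify i [] (fun xs => xs ++ [(k + l, 0)])) d
      = d.insert i ((PySem.List.pyRange 0 j 1).map (fun k => (k + l, 0))) := by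
  rw [PySem.List.pyRange_one_cons hj]
  simp only [List.foldl_cons, List.map_cons, BEq.rfl, if_pos]
  rw [inner_all i l _ (fun x hx => by
        have := (PySem.List.mem_pyRange_one).1 hx; omega)]
  rw [List.singleton_append]

-- the outer loop over fresh keys appends one (i, row i) item per i, with l = i*m
theorem outer_loop (m : Int) (hm : 0 < m) :
    ∀ (n : Nat) (a : Int) (d : PySem.Dict Int (List (Int × Int)))
      (_ : ∀ x : Int, a ≤ x → d.contains x = false),
    ((PySem.List.pyRange a (a + n) 1).foldl
        (fun (st : PySem.Dict Int (List (Int × Int)) × Int) i =>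
          ((PySem.List.pyRange 0 m 1).foldl
              (fun vv k =>
                if k == 0 then vv.insert i [(k + st.2, 0)]
                else vv.modify i [] (fun xs => xs ++ [(k + st.2, 0)])) st.1,
            st.2 + m))
        (d, a * m)).1.items
      = d.items
        ++ (PySem.List.pyRange a (a + n) 1).map
            (fun i => (i, (PySem.List.pyRange 0 m 1).map (fun k => (k + i * m, 0)))) := by
  intro n
  induction n with
  | zero =>
    intro a d _
    rw [show PySem.List.pyRange a (a + ((0 : Nat) : Int)) 1 = []
          from PySem.List.pyRange_one_eq_nil (by omega)]
    simp
  | succ n ih =>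
    intro a d hd
    rw [show PySem.List.pyRange a (a + ((n + 1 : Nat) : Int)) 1
          = a :: PySem.List.pyRange (a + 1) (a + ((n + 1 : Nat) : Int)) 1
          from PySem.List.pyRange_one_cons (by push_cast; omega)]
    simp only [List.foldl_cons, List.map_cons]
    rw [inner_loop a (a * m) m hm d]
    have hfresh : d.contains a = false := hd a le_rfl
    rw [show a * m + m = (a + 1) * m from by ring,
        show (a + ((n + 1 : Nat) : Int)) = (a + 1) + ((n : Nat) : Int) from by push_cast; ring,
        ih (a + 1) (d.insert a ((PySem.List.pyRange 0 m 1).map fun k => (k + a * m, 0)))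
          (by
            intro x hx
            rw [PySem.Dict.contains_insert]
            have hne : (x == a) = false := by simp only [beq_eq_false_iff_ne]; omega
            rw [hne, hd x (by omega)]
            rfl),
        PySem.Dict.items_insert_of_not_contains _ _ hfresh]
    rw [List.append_assoc, List.singleton_append]

-- the fold's dict component is untouched when the inner range is empty
theorem fold_snd_only (f : Int → Int) :
    ∀ (l : List Int) (st : PySem.Dict Int (List (Int × Int)) × Int),
    (l.foldl (fun st i => (st.1, st.2 + f i)) st).1 = st.1 := by
  intro l
  induction l with
  | nil => intro st; rfl
  | cons x l ih => intro st; simp [List.foldl_cons, ih]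

-- a slice of the flat index list is exactly macro variable i's row
theorem slice_flat (M m i : Int) (hm : 0 < m) (hi0 : 0 ≤ i) (hiM : i < M) :
    PySem.List.slice ((PySem.List.pyRange 0 (M * m) 1).map (fun n => (n, (0 : Int))))
        (some (i * m)) (some ((i + 1) * m))
      = (PySem.List.pyRange 0 m 1).map (fun k => (k + i * m, (0 : Int))) := by
  have him : 0 ≤ i * m := by positivity
  have hib : (i + 1) * m ≤ M * m := by nlinarith
  rw [PySem.List.slice_toNat _ him (by nlinarith)]
  rw [PySem.List.pyRange_one, PySem.List.pyRange_one]
  have h1 : (i + 1) * m = i * m + m := by ring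
  apply List.ext_getElem
  · simp
    omega
  · intro k h1 h2
    simp only [List.getElem_take, List.getElem_drop, List.getElem_map, List.getElem_range]
    have hk : k < m.toNat := by simp at h2; omega
    congr 1
    omega

-- ===== VERDICT (by name: the statement is the Claim_ definition above) =====
theorem vector_vars_from_Narray_spec : Claim_equal_vector_vars_from_Narray := by
  intro M m _
  unfold Spec_vector_vars_from_Narray vector_vars_from_Narray vector_vars_from_Narray_alt
  simp only [PySem.List.len_eq, List.length_replicate]
  by_cases hM : M < 2
  · rw [if_pos (by omega : (M.toNat : Int) < 2), if_pos hM]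
  · rw [if_neg (by omega : ¬ (M.toNat : Int) < 2), if_neg hM]
    have hbody := PySem.List.foldl_congr_mem (PySem.List.pyRange 0 (M.toNat : Int) 1)
      (fun (st : PySem.Dict Int (List (Int × Int)) × Int) i =>
        ((PySem.List.pyRange 0 (PySem.List.pyGetD (List.replicate M.toNat m) i 0) 1).foldl
            (fun vv k =>
              if k == 0 then vv.insert i [(k + st.2, 0)]
              else vv.modify i [] (fun xs => xs ++ [(k + st.2, 0)])) st.1,
          st.2 + PySem.List.pyGetD (List.replicate M.toNat m) i 0))
      (fun (st : PySem.Dict Int (List (Int × Int)) × Int) i =>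
        ((PySem.List.pyRange 0 m 1).foldl
            (fun vv k =>
              if k == 0 then vv.insert i [(k + st.2, 0)]
              else vv.modify i [] (fun xs => xs ++ [(k + st.2, 0)])) st.1,
          st.2 + m))
      (PySem.Dict.empty, 0)
      (by
        intro acc x hx
        have hx' := (PySem.List.mem_pyRange_one).1 hx
        have hj : PySem.List.pyGetD (List.replicate M.toNat m) x 0 = m := by
          rw [PySem.List.pyGetD_eq_getElem _ _ hx'.1 (by simp; omega)]
          simp
        simp only [hj])
    rw [hbody]
    by_cases hm : m ≤ 0
    · rw [if_pos hm]
      have hnil :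
          (fun (st : PySem.Dict Int (List (Int × Int)) × Int) i =>
            ((PySem.List.pyRange 0 m 1).foldl
                (fun vv k =>
                  if k == 0 then vv.insert i [(k + st.2, 0)]
                  else vv.modify i [] (fun xs => xs ++ [(k + st.2, 0)])) st.1,
              st.2 + m))
          = (fun (st : PySem.Dict Int (List (Int × Int)) × Int) i => (st.1, st.2 + m)) := by
        funext st i
        rw [PySem.List.pyRange_one_eq_nil hm]
        rfl
      rw [hnil, fold_snd_only (fun _ => m)]
      rfl
    · rw [if_neg hm]
      replace hm : 0 < m := by omega
      have h0 : (0 : Int) * m = 0 := by ring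
      have hout := outer_loop m hm M.toNat 0 PySem.Dict.empty
        (by intro x _; exact PySem.Dict.contains_empty x)
      rw [h0, zero_add] at hout
      rw [hout, show ((M.toNat : Int)) = M from by omega]
      rw [show (PySem.Dict.empty : PySem.Dict Int (List (Int × Int))).items = [] from rfl,
          List.nil_append]
      congr 1
      apply List.map_congr_left
      intro i hi
      have hi' := (PySem.List.mem_pyRange_one).1 hi
      rw [slice_flat M m i hm hi'.1 (by omega)]
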